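-- pv_equiv track=rewrite | github.com/KodingForKittehs/AdventOfCode-2025 | src/Day_02.py | get_invalid_in_range
-- ===== SOURCE A (Python) =====
-- def is_invalid_p1(s):
--     if s[0:len(s)//2] == s[len(s)//2:]:
--         return True
--     return False
--
-- def is_invalid_p2(s):
--     n = len(s)
--     for length in range(1, n//2 + 1):
--         if n % length == 0:
--             pattern = s[:length]
--             if pattern * (n // length) == s:
--                 return True
--     return False
--
-- def get_invalid_in_range(a, b):
--     invalids = set()
--     invalids_p2 = set()
--     for i in range(a, b + 1):
--         s = str(i)
--         if is_invalid_p1(s):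
--             invalids.add(i)
--         if is_invalid_p2(s):
--             invalids_p2.add(i)
--     return invalids, invalids_p2
-- ===== SOURCE B (Python) =====
-- def get_invalid_in_range(a, b):
--     # Generate the "repeated" numbers directly instead of scanning [a, b]:
--     #  p1: the two halves of str(v) are equal  <=>  v = x * (10**d + 1) with x a d-digit number;
--     #  p2: str(v) is a pattern of L digits repeated k >= 2 times
--     #      <=> v = p * (10**n - 1) // (10**L - 1) with p an L-digit number, L a proper divisor of n.
--     # Negative numbers and single-digit numbers are never invalid (the '-' sign / a lone digit
--     # cannot repeat), so only 1 <= v <= b, v with at least 2 digits, matters.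
--     invalids = []
--     invalids_p2 = []
--     if b >= 1:
--         nb = len(str(b))
--         for d in range(1, nb // 2 + 1):
--             m = 10 ** d + 1
--             for x in range(10 ** (d - 1), 10 ** d):
--                 v = x * m
--                 if a <= v <= b:
--                     invalids.append(v)
--         for n in range(2, nb + 1):
--             block = set()
--             for L in range(1, n // 2 + 1):
--                 if n % L == 0:
--                     rep = (10 ** n - 1) // (10 ** L - 1)
--                     for p in range(10 ** (L - 1), 10 ** L):
--                         v = p * rep
--                         if a <= v <= b:
--                             block.add(v)
--             invalids_p2.extend(sorted(block))
--     return set(invalids), set(invalids_p2)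
-- ===== Notes on version B (the rewrite author's own statement) =====
-- stated objective: faster
-- what changed: Instead of scanning every integer in [a,b] and string-testing each one, B generates the repeated-digit numbers directly (x*(10^d+1) for part 1; p*((10^n-1)//(10^L-1)) for an L-digit pattern repeated n/L times for part 2) and keeps those that fall in [a,b].
import Mathlib
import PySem

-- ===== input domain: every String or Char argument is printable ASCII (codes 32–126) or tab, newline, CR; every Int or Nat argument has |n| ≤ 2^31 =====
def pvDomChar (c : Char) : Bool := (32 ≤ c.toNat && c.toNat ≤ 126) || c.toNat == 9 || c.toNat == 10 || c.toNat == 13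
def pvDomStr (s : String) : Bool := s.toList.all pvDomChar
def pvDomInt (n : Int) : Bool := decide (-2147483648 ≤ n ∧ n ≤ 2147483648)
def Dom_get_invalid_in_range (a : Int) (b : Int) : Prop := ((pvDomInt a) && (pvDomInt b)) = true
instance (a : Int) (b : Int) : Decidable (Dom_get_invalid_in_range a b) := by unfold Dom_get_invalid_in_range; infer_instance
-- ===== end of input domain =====

-- B replaces A's per-integer scan of [a, b] (a string test on str(i) for every i) by direct
-- generation of the repeated-digit numbers (x*(10^d+1); pattern*((10^n-1)/(10^L-1))), clipped to [a, b].


-- ===== PORT A =====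
def is_invalid_p1 (s : String) : Bool :=
  if PySem.Str.slice s (some 0) (some (PySem.Int.floordiv (PySem.Str.len s) 2)) =
     PySem.Str.slice s (some (PySem.Int.floordiv (PySem.Str.len s) 2)) none
  then true else false

def is_invalid_p2 (s : String) : Bool :=
  let n := PySem.Str.len s
  (PySem.List.pyRange 1 (PySem.Int.floordiv n 2 + 1) 1).any fun length =>
    if PySem.Int.mod n length = 0 then
      let pattern := PySem.Str.slice s none (some length)
      decide (String.ofList (PySem.List.pyRepeat pattern.toList (PySem.Int.floordiv n length)) = s)
    else false

def get_invalid_in_range (a : Int) (b : Int) : List Int × List Int :=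
  (PySem.List.pyRange a (b + 1) 1).foldl
    (fun (acc : PySem.Set Int × PySem.Set Int) i =>
      let s := PySem.Int.toStr i
      (if is_invalid_p1 s then PySem.Set.add acc.1 i else acc.1,
       if is_invalid_p2 s then PySem.Set.add acc.2 i else acc.2))
    (PySem.Set.empty, PySem.Set.empty)

-- ===== PORT B =====
def get_invalid_in_range_alt (a : Int) (b : Int) : List Int × List Int :=
  if 1 ≤ b then
    let nb := PySem.Str.len (PySem.Int.toStr b)
    let invalids := (PySem.List.pyRange 1 (PySem.Int.floordiv nb 2 + 1) 1).foldl
      (fun (acc : List Int) d =>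
        let m := (10:Int) ^ d.toNat + 1
        (PySem.List.pyRange ((10:Int) ^ (d-1).toNat) ((10:Int) ^ d.toNat) 1).foldl
          (fun acc x => let v := x * m; if a ≤ v ∧ v ≤ b then acc ++ [v] else acc) acc) []
    let invalids_p2 := (PySem.List.pyRange 2 (nb + 1) 1).foldl
      (fun (acc : List Int) n =>
        let block : PySem.Set Int := (PySem.List.pyRange 1 (PySem.Int.floordiv n 2 + 1) 1).foldl
          (fun (bl : PySem.Set Int) L =>
            if PySem.Int.mod n L = 0 then
              let rep := PySem.Int.floordiv ((10:Int) ^ n.toNat - 1) ((10:Int) ^ L.toNat - 1)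
              (PySem.List.pyRange ((10:Int) ^ (L-1).toNat) ((10:Int) ^ L.toNat) 1).foldl
                (fun bl p => let v := p * rep; if a ≤ v ∧ v ≤ b then PySem.Set.add bl v else bl) bl
            else bl) PySem.Set.empty
        acc ++ PySem.List.sorted block (fun x => x) false) []
    (PySem.Set.ofList invalids, PySem.Set.ofList invalids_p2)
  else ([], [])

-- ===== PRECONDITION & SPEC =====
def Spec_get_invalid_in_range (a : Int) (b : Int) (out : List Int × List Int) : Prop := out = get_invalid_in_range_alt a b
instance (a : Int) (b : Int) (out : List Int × List Int) : Decidable (Spec_get_invalid_in_range a b out) := by unfold Spec_get_invalid_in_range; infer_instance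

-- ===== CLAIM (what is proved, stated in full; the proofs are below) =====
def Claim_equal_get_invalid_in_range : Prop := ∀ (a : Int) (b : Int), Dom_get_invalid_in_range a b → Spec_get_invalid_in_range a b (get_invalid_in_range a b)

-- ===== LEMMAS AND PROOFS =====
def pvPad : Nat → Nat → List Char
  | 0, _ => []
  | d+1, v => pvPad d (v / 10) ++ [Nat.digitChar (v % 10)]

lemma pvPad_length (d v : Nat) : (pvPad d v).length = d := by
  induction d generalizing v with
  | zero => rfl
  | succ d ih => simp [pvPad, ih]

lemma toDigitsCore_acc (f n : Nat) (acc : List Char) :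
    Nat.toDigitsCore 10 f n acc = Nat.toDigitsCore 10 f n [] ++ acc := by
  induction f generalizing n acc with
  | zero => simp [Nat.toDigitsCore]
  | succ f ih =>
    simp only [Nat.toDigitsCore]
    by_cases h : n / 10 = 0
    · simp [h]
    · simp only [h, if_false]
      rw [ih (n/10) (Nat.digitChar (n % 10) :: acc), ih (n/10) [Nat.digitChar (n % 10)]]
      simp

lemma toDigitsCore_fuel (f f' n : Nat) (h : n < f) (h' : n < f') :
    Nat.toDigitsCore 10 f n [] = Nat.toDigitsCore 10 f' n [] := by
  induction f generalizing f' n with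
  | zero => omega
  | succ f ih =>
    cases f' with
    | zero => omega
    | succ f' =>
      simp only [Nat.toDigitsCore]
      by_cases h0 : n / 10 = 0
      · simp [h0]
      · simp only [h0, if_false]
        rw [toDigitsCore_acc f, toDigitsCore_acc f']
        rw [ih f' (n/10) (by omega) (by omega)]

lemma toDigits_lt (n : Nat) (h : n < 10) : Nat.toDigits 10 n = [Nat.digitChar n] := by
  simp [Nat.toDigits, Nat.toDigitsCore, Nat.div_eq_of_lt h, Nat.mod_eq_of_lt h]

lemma toDigits_ge (n : Nat) (h : 10 ≤ n) :
    Nat.toDigits 10 n = Nat.toDigits 10 (n / 10) ++ [Nat.digitChar (n % 10)] := by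
  have h0 : n / 10 ≠ 0 := by omega
  simp only [Nat.toDigits, Nat.toDigitsCore, h0, if_false]
  rw [toDigitsCore_acc n (n/10) [Nat.digitChar (n % 10)]]
  rw [toDigitsCore_fuel n (n/10+1) (n/10) (by omega) (by omega)]
  simp only [Nat.toDigitsCore]

lemma toDigits_eq_pvPad (d : Nat) : ∀ v : Nat, 1 ≤ d → 10^(d-1) ≤ v → v < 10^d →
    Nat.toDigits 10 v = pvPad d v := by
  induction d with
  | zero => omega
  | succ d ih =>
    intro v _ hlo hhi
    cases Nat.eq_zero_or_pos d with
    | inl h0 =>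
      subst h0
      simp at hlo hhi
      rw [toDigits_lt v hhi]
      simp [pvPad, Nat.mod_eq_of_lt hhi]
    | inr hd =>
      have hpow : (10:Nat)^(d-1) * 10 = 10^d := by
        rw [← pow_succ]; congr 1; omega
      have hpow2 : (10:Nat)^d * 10 = 10^(d+1) := by rw [← pow_succ]
      have h10 : 10 ≤ v := by
        have h1 : (10:Nat)^1 ≤ 10^d := Nat.pow_le_pow_right (by norm_num) hd
        simp only [Nat.add_sub_cancel] at hlo
        simp at h1; omega
      rw [toDigits_ge v h10]
      rw [ih (v/10) hd
        (by rw [Nat.le_div_iff_mul_le (by norm_num)]; simp only [Nat.add_sub_cancel] at hlo; omega)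
        (by rw [Nat.div_lt_iff_lt_mul (by norm_num)]; omega)]
      simp [pvPad]

lemma digitChar_inj {a b : Nat} (ha : a < 10) (hb : b < 10)
    (h : Nat.digitChar a = Nat.digitChar b) : a = b := by
  interval_cases a <;> interval_cases b <;> simp_all [Nat.digitChar]

lemma digitChar_ne_dash {a : Nat} (ha : a < 10) : Nat.digitChar a ≠ '-' := by
  interval_cases a <;> decide

lemma pvPad_split (c d v : Nat) : pvPad (c + d) v = pvPad c (v / 10^d) ++ pvPad d (v % 10^d) := by
  induction d generalizing v with
  | zero => simp [pvPad]
  | succ d ih =>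
    have e1 : v % 10^(d+1) % 10 = v % 10 := by
      rw [Nat.mod_mod_of_dvd]
      exact dvd_pow_self 10 (by omega)
    have e2 : v % 10^(d+1) / 10 = v / 10 % 10^d := by
      rw [pow_succ']
      rw [Nat.mod_mul_right_div_self]  -- guess
    have e3 : v / 10^(d+1) = v / 10 / 10^d := by
      rw [pow_succ', Nat.div_div_eq_div_mul]
    rw [show c + (d+1) = (c+d) + 1 by omega]
    show pvPad (c+d) (v/10) ++ [Nat.digitChar (v % 10)] = _
    rw [ih (v/10)]
    simp [pvPad, e1, e2, e3]

lemma pvPad_inj {d v w : Nat} (hv : v < 10^d) (hw : w < 10^d)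
    (h : pvPad d v = pvPad d w) : v = w := by
  induction d generalizing v w with
  | zero => omega
  | succ d ih =>
    simp only [pvPad] at h
    obtain ⟨h1, h2⟩ := List.append_inj' h (by simp)
    simp only [List.cons.injEq, and_true] at h2
    have hd : v % 10 = w % 10 :=
      digitChar_inj (Nat.mod_lt _ (by norm_num)) (Nat.mod_lt _ (by norm_num)) h2
    have hq : v / 10 = w / 10 := ih (by
      rw [Nat.div_lt_iff_lt_mul (by norm_num)]; rw [pow_succ] at hv; omega) (by
      rw [Nat.div_lt_iff_lt_mul (by norm_num)]; rw [pow_succ] at hw; omega) h1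
    omega

lemma dash_not_mem_pvPad (d v : Nat) : '-' ∉ pvPad d v := by
  induction d generalizing v with
  | zero => simp [pvPad]
  | succ d ih =>
    simp [pvPad]
    exact ⟨fun h => ih (v/10) h, fun h => digitChar_ne_dash (Nat.mod_lt _ (by norm_num)) h.symm⟩

def pvGeom : Nat → Nat → Nat
  | 0, _ => 0
  | k+1, L => 10^(k*L) + pvGeom k L

lemma pvGeom_mul_lt {p L : Nat} (k : Nat) (hp : p < 10^L) : p * pvGeom k L < 10^(k*L) := by
  induction k with
  | zero => simp [pvGeom]
  | succ k ih =>
    have h1 : p * pvGeom (k+1) L = p * 10^(k*L) + p * pvGeom k L := by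
      simp [pvGeom]; ring
    have h2 : (10:Nat)^((k+1)*L) = 10^L * 10^(k*L) := by
      rw [← pow_add]; congr 1; ring
    calc p * pvGeom (k+1) L < p * 10^(k*L) + 10^(k*L) := by omega
      _ = (p+1) * 10^(k*L) := by ring
      _ ≤ 10^L * 10^(k*L) := Nat.mul_le_mul_right _ (by omega)
      _ = 10^((k+1)*L) := h2.symm

lemma pvGeom_mul_ge {p L k : Nat} (hp : 10^(L-1) ≤ p) (hk : 1 ≤ k) (hL : 1 ≤ L) :
    10^(k*L - 1) ≤ p * pvGeom k L := by
  cases k with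
  | zero => omega
  | succ k =>
    have h1 : 10^(k*L) ≤ pvGeom (k+1) L := by simp [pvGeom]
    calc (10:Nat)^((k+1)*L - 1) = 10^(L-1) * 10^(k*L) := by
          rw [← pow_add]; congr 1; cases L with | zero => omega | succ L => ring_nf; omega
      _ ≤ p * pvGeom (k+1) L := Nat.mul_le_mul hp h1

lemma pvGeom_mul_eq' (k L : Nat) : pvGeom k L * (10^L - 1) + 1 = 10^(k*L) := by
  induction k with
  | zero => simp [pvGeom]
  | succ k ih =>
    have hL : (1:Nat) ≤ 10^L := Nat.one_le_pow _ _ (by norm_num)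
    have h2 : (10:Nat)^((k+1)*L) = 10^(k*L) * 10^L := by rw [← pow_add]; congr 1; ring
    have hmul : 10^(k*L) ≤ 10^(k*L) * 10^L := Nat.le_mul_of_pos_right _ (by positivity)
    have expand : pvGeom (k+1) L * (10^L - 1) + 1
        = 10^(k*L) * (10^L - 1) + (pvGeom k L * (10^L - 1) + 1) := by
      simp [pvGeom]; ring
    rw [expand, ih, Nat.mul_sub, h2]
    simp only [Nat.mul_one]
    omega

lemma pvGeom_mul_eq (k L : Nat) : 10^(k*L) - 1 = pvGeom k L * (10^L - 1) := by
  have := pvGeom_mul_eq' k L; omega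

lemma pvGeom_div_top {p L k : Nat} (hp : p < 10^L) (hk : 1 ≤ k) :
    (p * pvGeom k L) / 10^((k-1)*L) = p := by
  cases k with
  | zero => omega
  | succ k =>
    have h1 : p * pvGeom (k+1) L = p * 10^(k*L) + p * pvGeom k L := by simp [pvGeom]; ring
    have h2 := pvGeom_mul_lt (p := p) (L := L) k hp
    simp only [Nat.add_sub_cancel]
    rw [h1, Nat.mul_comm p (10^(k*L)), Nat.mul_add_div (by positivity), Nat.div_eq_of_lt h2]
    omega

lemma flatten_replicate_pvPad {p L : Nat} (k : Nat) (hp : p < 10^L) :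
    (List.replicate k (pvPad L p)).flatten = pvPad (k*L) (p * pvGeom k L) := by
  induction k with
  | zero => simp [pvGeom, pvPad]
  | succ k ih =>
    have h2 := pvGeom_mul_lt (p := p) (L := L) k hp
    have h1 : p * pvGeom (k+1) L = p * 10^(k*L) + p * pvGeom k L := by simp [pvGeom]; ring
    rw [List.replicate_succ, List.flatten_cons, ih]
    have hdiv : (p * pvGeom (k+1) L) / 10^(k*L) = p := by
      have h := pvGeom_div_top (k := k+1) (L := L) (p := p) hp (by omega)
      simpa using h
    have hmod : (p * pvGeom (k+1) L) % 10^(k*L) = p * pvGeom k L := by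
      rw [h1, Nat.mul_comm p (10^(k*L)), Nat.mul_add_mod, Nat.mod_eq_of_lt h2]
    rw [show (k+1)*L = L + k*L by ring, pvPad_split, hdiv, hmod]

lemma toStr_toList_pos {v d : Nat} (hd : 1 ≤ d) (hlo : 10^(d-1) ≤ v) (hhi : v < 10^d) :
    (PySem.Int.toStr (v:Int)).toList = pvPad d v := by
  rw [PySem.Int.toList_toStr]
  simp [PySem.Int.toChars, toDigits_eq_pvPad d v hd hlo hhi]

lemma str_eq_iff_toList {s t : String} : s = t ↔ s.toList = t.toList :=
  ⟨fun h => h ▸ rfl, String.toList_inj.mp⟩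

lemma p1_char {v d : Nat} (hd : 1 ≤ d) (hlo : 10^(d-1) ≤ v) (hhi : v < 10^d) :
    (is_invalid_p1 (PySem.Int.toStr (v:Int)) = true)
      ↔ (d % 2 = 0 ∧ v / 10^(d/2) = v % 10^(d/2)) := by
  have hlist := toStr_toList_pos hd hlo hhi
  have hlen : PySem.Str.len (PySem.Int.toStr (v:Int)) = (d:Int) := by
    rw [PySem.Str.len_eq, hlist, pvPad_length]  -- guess name Str.len_eq : Str.len s = s.toList.length?
  unfold is_invalid_p1
  rw [hlen]
  have h2 : PySem.Int.floordiv (d:Int) 2 = ((d/2 : Nat) : Int) := by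
    exact_mod_cast PySem.Int.floordiv_natCast d 2
  rw [h2]
  have key : (PySem.Str.slice (PySem.Int.toStr (v:Int)) (some 0) (some ((d/2:Nat):Int))
        = PySem.Str.slice (PySem.Int.toStr (v:Int)) (some ((d/2:Nat):Int)) none)
      ↔ ((pvPad d v).take (d/2) = (pvPad d v).drop (d/2)) := by
    rw [str_eq_iff_toList]
    simp only [PySem.Str.toList_slice, PySem.Chars.slice_eq_listSlice, hlist]
    rw [PySem.List.slice_zero_start, PySem.List.slice_to_natCast, PySem.List.slice_from_natCast]
  have hite : ∀ (c : Prop) [Decidable c], ((if c then true else false) = true ↔ c) := by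
    intro c hc; split_ifs with h <;> simp [h]
  rw [hite, key]
  by_cases hpar : d % 2 = 0
  · have he : d = d/2 + d/2 := by omega
    set e := d/2 with hee
    have hsplit : pvPad d v = pvPad e (v / 10^e) ++ pvPad e (v % 10^e) := by
      rw [he]; exact pvPad_split e e v
    have hdivlt : v / 10^e < 10^e := by
      rw [Nat.div_lt_iff_lt_mul (by positivity)]
      calc v < 10^d := hhi
        _ = 10^e * 10^e := by rw [← pow_add, ← he]
    have hmodlt : v % 10^e < 10^e := Nat.mod_lt _ (by positivity)
    rw [hsplit, List.take_left' (pvPad_length e _), List.drop_left' (pvPad_length e _)]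
    constructor
    · intro h; exact ⟨hpar, pvPad_inj hdivlt hmodlt h⟩
    · rintro ⟨-, h⟩; rw [h]
  · simp only [hpar, false_and, iff_false]
    intro hcontra
    have := congrArg List.length hcontra
    simp [pvPad_length] at this
    omega

lemma exists_digits (v : Nat) (hv : 1 ≤ v) : ∃ d, 1 ≤ d ∧ 10^(d-1) ≤ v ∧ v < 10^d :=
  ⟨Nat.log 10 v + 1, by omega, by simpa using Nat.pow_log_le_self 10 (by omega),
    Nat.lt_pow_succ_log_self (by norm_num) v⟩

lemma pattern_cond {v d L : Nat} (hd : 1 ≤ d) (hlo : 10^(d-1) ≤ v) (hhi : v < 10^d)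
    (hL1 : 1 ≤ L) (hL2 : L ≤ d/2) (hdvd : L ∣ d) :
    (String.ofList (PySem.List.pyRepeat
        (PySem.Str.slice (PySem.Int.toStr (v:Int)) none (some (L:Int))).toList
        (PySem.Int.floordiv (d:Int) (L:Int))) = PySem.Int.toStr (v:Int))
    ↔ v = (v / 10^(d-L)) * pvGeom (d/L) L := by
  have hlist := toStr_toList_pos hd hlo hhi
  have hfd : PySem.Int.floordiv (d:Int) (L:Int) = ((d/L : Nat) : Int) := by
    exact_mod_cast PySem.Int.floordiv_natCast d L
  have hpatL : (PySem.Str.slice (PySem.Int.toStr (v:Int)) none (some (L:Int))).toList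
      = List.take L (pvPad d v) := by
    simp only [PySem.Str.toList_slice, PySem.Chars.slice_eq_listSlice, hlist]
    rw [PySem.List.slice_to_natCast]
  set p : Nat := v / 10^(d-L) with hp
  have hsplitd : d = L + (d - L) := by omega
  have htake : List.take L (pvPad d v) = pvPad L p := by
    conv_lhs => rw [hsplitd, pvPad_split]
    rw [List.take_left' (pvPad_length _ _)]
  have hplt : p < 10^L := by
    rw [hp, Nat.div_lt_iff_lt_mul (by positivity)]
    calc v < 10^d := hhi
      _ = 10^L * 10^(d-L) := by rw [← pow_add, ← hsplitd]
  have hkL : (d/L) * L = d := Nat.div_mul_cancel hdvd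
  have hrepl : PySem.List.pyRepeat (pvPad L p) ((d/L : Nat) : Int)
      = pvPad d (p * pvGeom (d/L) L) := by
    show (List.replicate (((d/L : Nat):Int)).toNat (pvPad L p)).flatten = _
    rw [Int.toNat_natCast, flatten_replicate_pvPad _ hplt, hkL]
  rw [hfd, hpatL, htake, hrepl, str_eq_iff_toList, String.toList_ofList, hlist]
  constructor
  · intro h
    have hb : p * pvGeom (d/L) L < 10^d := by
      have h2 := pvGeom_mul_lt (p := p) (L := L) (d/L) hplt
      rwa [hkL] at h2
    exact (pvPad_inj hb hhi h).symm
  · intro h; rw [← h]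

lemma p2_char {v d : Nat} (hd : 1 ≤ d) (hlo : 10^(d-1) ≤ v) (hhi : v < 10^d) :
    (is_invalid_p2 (PySem.Int.toStr (v:Int)) = true)
      ↔ ∃ L : Nat, 1 ≤ L ∧ L ≤ d/2 ∧ L ∣ d ∧ v = (v / 10^(d-L)) * pvGeom (d/L) L := by
  have hlist := toStr_toList_pos hd hlo hhi
  have hlen : PySem.Str.len (PySem.Int.toStr (v:Int)) = (d:Int) := by
    rw [PySem.Str.len_eq, hlist, pvPad_length]
  simp only [is_invalid_p2, hlen, List.any_eq_true]
  have h2 : PySem.Int.floordiv (d:Int) 2 = ((d/2 : Nat) : Int) := by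
    exact_mod_cast PySem.Int.floordiv_natCast d 2
  rw [h2]
  constructor
  · rintro ⟨x, hx, hpred⟩
    rw [PySem.List.mem_pyRange_one] at hx
    obtain ⟨hx1, hx2⟩ := hx
    obtain ⟨L, rfl⟩ : ∃ L:Nat, x = (L:Int) := ⟨x.toNat, by omega⟩
    have hL1 : 1 ≤ L := by exact_mod_cast hx1
    have hL2 : L ≤ d/2 := by omega
    by_cases hdvd : PySem.Int.mod (d:Int) (L:Int) = 0
    · rw [if_pos hdvd, decide_eq_true_iff] at hpred
      have hdvdN : L ∣ d := by
        rw [PySem.Int.mod_eq_zero_iff_dvd] at hdvd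
        exact_mod_cast hdvd
      refine ⟨L, hL1, hL2, hdvdN, ?_⟩
      exact (pattern_cond hd hlo hhi hL1 hL2 hdvdN).mp hpred
    · rw [if_neg hdvd] at hpred; exact absurd hpred (by simp)
  · rintro ⟨L, hL1, hL2, hdvd, heq⟩
    refine ⟨(L:Int), ?_, ?_⟩
    · rw [PySem.List.mem_pyRange_one]; omega
    · have hdvdI : PySem.Int.mod (d:Int) (L:Int) = 0 := by
        rw [PySem.Int.mod_eq_zero_iff_dvd]; exact_mod_cast hdvd
      rw [if_pos hdvdI, decide_eq_true_iff]
      exact (pattern_cond hd hlo hhi hL1 hL2 hdvd).mpr heq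

lemma dash_not_mem_toDigits (m : Nat) : '-' ∉ Nat.toDigits 10 m := by
  rcases Nat.eq_zero_or_pos m with h | h
  · subst h; decide
  · obtain ⟨d, hd, hlo, hhi⟩ := exists_digits m h
    rw [toDigits_eq_pvPad d m hd hlo hhi]
    exact dash_not_mem_pvPad d m

lemma toStr_toList_neg {i : Int} (hi : i < 0) :
    (PySem.Int.toStr i).toList = '-' :: Nat.toDigits 10 i.natAbs := by
  rw [PySem.Int.toList_toStr]
  simp [PySem.Int.toChars, hi]

lemma count_dash_toStr_neg {i : Int} (hi : i < 0) :
    List.count '-' (PySem.Int.toStr i).toList = 1 := by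
  rw [toStr_toList_neg hi]
  simp [List.count_cons, List.count_eq_zero.mpr (dash_not_mem_toDigits i.natAbs)]

lemma p1_neg {i : Int} (hi : i < 0) : is_invalid_p1 (PySem.Int.toStr i) = false := by
  set s := PySem.Int.toStr i with hs
  unfold is_invalid_p1
  rw [if_neg]
  intro hcontra
  rw [str_eq_iff_toList] at hcontra
  have hlen : PySem.Str.len s = ((s.toList.length : Nat) : Int) := by
    rw [PySem.Str.len_eq]
  have hfd : PySem.Int.floordiv ((s.toList.length : Nat) : Int) 2 = ((s.toList.length/2 : Nat) : Int) := by
    exact_mod_cast PySem.Int.floordiv_natCast s.toList.length 2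
  rw [hlen, hfd] at hcontra
  simp only [PySem.Str.toList_slice, PySem.Chars.slice_eq_listSlice] at hcontra
  rw [PySem.List.slice_zero_start, PySem.List.slice_to_natCast, PySem.List.slice_from_natCast] at hcontra
  set H := s.toList.length / 2
  have hsplit := List.take_append_drop H s.toList
  have hcount : List.count '-' s.toList
      = List.count '-' (List.take H s.toList) + List.count '-' (List.drop H s.toList) := by
    conv_lhs => rw [← hsplit]
    rw [List.count_append]
  rw [← hcontra] at hcount
  rw [count_dash_toStr_neg hi] at hcount
  omega

lemma p2_neg {i : Int} (hi : i < 0) : is_invalid_p2 (PySem.Int.toStr i) = false := by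
  set s := PySem.Int.toStr i with hs
  rw [← Bool.not_eq_true]
  intro hcontra
  simp only [is_invalid_p2, List.any_eq_true] at hcontra
  obtain ⟨x, hx, hpred⟩ := hcontra
  rw [PySem.List.mem_pyRange_one] at hx
  obtain ⟨L, rfl⟩ : ∃ L:Nat, x = (L:Int) := ⟨x.toNat, by omega⟩
  set n := s.toList.length with hn
  have hlen : PySem.Str.len s = ((n : Nat) : Int) := by rw [PySem.Str.len_eq]
  have hfd2 : PySem.Int.floordiv ((n:Nat):Int) 2 = ((n/2 : Nat) : Int) := by
    exact_mod_cast PySem.Int.floordiv_natCast n 2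
  rw [hlen, hfd2] at hx
  have hL1 : 1 ≤ L := by exact_mod_cast hx.1
  have hL2 : L ≤ n/2 := by
    have := hx.2; omega
  rw [hlen] at hpred
  by_cases hdvd : PySem.Int.mod ((n:Nat):Int) ((L:Nat):Int) = 0
  swap
  · rw [if_neg hdvd] at hpred; exact absurd hpred (by simp)
  rw [if_pos hdvd, decide_eq_true_iff] at hpred
  have hfdL : PySem.Int.floordiv ((n:Nat):Int) ((L:Nat):Int) = ((n/L : Nat) : Int) := by
    exact_mod_cast PySem.Int.floordiv_natCast n L
  rw [hfdL] at hpred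
  set k := n / L with hk
  have hk2 : 2 ≤ k := by
    rw [hk, Nat.le_div_iff_mul_le (by omega)]
    have : 2 * (n/2) ≤ n := Nat.mul_div_le n 2  -- guess
    omega
  -- pattern contains '-'
  have hslist : s.toList = '-' :: Nat.toDigits 10 i.natAbs := toStr_toList_neg hi
  have hpat : (PySem.Str.slice s none (some ((L:Nat):Int))).toList = List.take L s.toList := by
    simp only [PySem.Str.toList_slice, PySem.Chars.slice_eq_listSlice]
    rw [PySem.List.slice_to_natCast]
  have hdashpat : '-' ∈ (PySem.Str.slice s none (some ((L:Nat):Int))).toList := by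
    rw [hpat, hslist]
    cases L with
    | zero => omega
    | succ L => simp [List.take_succ_cons]
  rw [str_eq_iff_toList, String.toList_ofList] at hpred
  have hcount := congrArg (List.count '-') hpred
  have hflat : PySem.List.pyRepeat (PySem.Str.slice s none (some ((L:Nat):Int))).toList ((k:Nat):Int)
      = (List.replicate k (PySem.Str.slice s none (some ((L:Nat):Int))).toList).flatten := by
    show (List.replicate (((k:Nat):Int)).toNat _).flatten = _
    rw [Int.toNat_natCast]
  rw [hflat] at hcount
  rw [List.count_flatten, List.map_replicate, List.sum_replicate] at hcount
  rw [count_dash_toStr_neg hi] at hcount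
  have hc1 : 1 ≤ List.count '-' (PySem.Str.slice s none (some ((L:Nat):Int))).toList :=
    List.one_le_count_iff.mpr hdashpat  -- guess
  have hsm : k • List.count '-' (PySem.Str.slice s none (some ((L:Nat):Int))).toList
      = k * List.count '-' (PySem.Str.slice s none (some ((L:Nat):Int))).toList := rfl
  rw [hsm] at hcount
  have h2le : 2 * 1 ≤ k * List.count '-' (PySem.Str.slice s none (some ((L:Nat):Int))).toList :=
    Nat.mul_le_mul hk2 hc1
  omega

lemma p1_zero : is_invalid_p1 (PySem.Int.toStr 0) = false := by decide

lemma p2_zero : is_invalid_p2 (PySem.Int.toStr 0) = false := by decide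

def pvP1 (i : Int) : Bool := is_invalid_p1 (PySem.Int.toStr i)

def pvP2 (i : Int) : Bool := is_invalid_p2 (PySem.Int.toStr i)

lemma fold_add_filter (f g : Int → Bool) (l : List Int) :
    ∀ (acc1 acc2 : List Int), l.Nodup → (∀ x ∈ acc1, x ∉ l) → (∀ x ∈ acc2, x ∉ l) →
    l.foldl (fun acc i => (if f i then PySem.Set.add acc.1 i else acc.1,
                           if g i then PySem.Set.add acc.2 i else acc.2)) (acc1, acc2)
    = (acc1 ++ l.filter f, acc2 ++ l.filter g) := by
  induction l with
  | nil => simp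
  | cons i t ih =>
    intro acc1 acc2 hnd h1 h2
    have hi1 : i ∉ acc1 := fun h => h1 i h (by simp)
    have hi2 : i ∉ acc2 := fun h => h2 i h (by simp)
    have hadd1 : PySem.Set.add acc1 i = acc1 ++ [i] := by
      simp [PySem.Set.add, List.contains_iff_mem, hi1]
    have hadd2 : PySem.Set.add acc2 i = acc2 ++ [i] := by
      simp [PySem.Set.add, List.contains_iff_mem, hi2]
    have hnt := (List.nodup_cons.mp hnd).2
    have hit := (List.nodup_cons.mp hnd).1
    simp only [List.foldl_cons]
    have step : ∀ (c1 c2 : List Int), (∀ x ∈ c1, x ∉ t) → (∀ x ∈ c2, x ∉ t) →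
        t.foldl (fun acc i => (if f i then PySem.Set.add acc.1 i else acc.1,
                               if g i then PySem.Set.add acc.2 i else acc.2)) (c1, c2)
        = (c1 ++ t.filter f, c2 ++ t.filter g) := fun c1 c2 hc1 hc2 => ih c1 c2 hnt hc1 hc2
    by_cases hf : f i <;> by_cases hg : g i <;>
      simp only [hf, hg, if_true, if_false, hadd1, hadd2, List.filter_cons] <;>
      rw [step] <;>
      simp_all <;>
      rintro x (hx | rfl) <;>
      first
        | exact (h1 x hx).2
        | exact (h2 x hx).2
        | exact hit

lemma A_eq (a b : Int) : get_invalid_in_range a b =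
    ((PySem.List.pyRange a (b+1) 1).filter pvP1, (PySem.List.pyRange a (b+1) 1).filter pvP2) := by
  have h := fold_add_filter pvP1 pvP2 (PySem.List.pyRange a (b+1) 1) [] []
    (PySem.List.nodup_pyRange_one _ _) (by simp) (by simp)
  simp only [List.nil_append] at h
  exact h

def pvL1 (a b : Int) : List Int :=
  (PySem.List.pyRange 1 (PySem.Int.floordiv (PySem.Str.len (PySem.Int.toStr b)) 2 + 1) 1).foldl
    (fun (acc : List Int) d =>
      (PySem.List.pyRange ((10:Int) ^ (d-1).toNat) ((10:Int) ^ d.toNat) 1).foldl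
        (fun acc x => if a ≤ x * ((10:Int) ^ d.toNat + 1) ∧ x * ((10:Int) ^ d.toNat + 1) ≤ b
          then acc ++ [x * ((10:Int) ^ d.toNat + 1)] else acc) acc) []

def pvBlock (a b n : Int) : PySem.Set Int :=
  (PySem.List.pyRange 1 (PySem.Int.floordiv n 2 + 1) 1).foldl
    (fun (bl : PySem.Set Int) L =>
      if PySem.Int.mod n L = 0 then
        (PySem.List.pyRange ((10:Int) ^ (L-1).toNat) ((10:Int) ^ L.toNat) 1).foldl
          (fun bl p => if a ≤ p * PySem.Int.floordiv ((10:Int) ^ n.toNat - 1) ((10:Int) ^ L.toNat - 1)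
              ∧ p * PySem.Int.floordiv ((10:Int) ^ n.toNat - 1) ((10:Int) ^ L.toNat - 1) ≤ b
            then PySem.Set.add bl (p * PySem.Int.floordiv ((10:Int) ^ n.toNat - 1) ((10:Int) ^ L.toNat - 1)) else bl) bl
      else bl) PySem.Set.empty

def pvL2 (a b : Int) : List Int :=
  (PySem.List.pyRange 2 (PySem.Str.len (PySem.Int.toStr b) + 1) 1).foldl
    (fun (acc : List Int) n => acc ++ PySem.List.sorted (pvBlock a b n) (fun x => x) false) []

lemma B_eval (a b : Int) (h1b : 1 ≤ b) :
    get_invalid_in_range_alt a b = (PySem.Set.ofList (pvL1 a b), PySem.Set.ofList (pvL2 a b)) := by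
  unfold get_invalid_in_range_alt pvL1 pvL2 pvBlock
  rw [if_pos h1b]

def pvMathP1 (y : Int) : Prop :=
  ∃ d x : Nat, 1 ≤ d ∧ 10^(d-1) ≤ x ∧ x < 10^d ∧ y = ((x * (10^d + 1) : Nat) : Int)

def pvMathP2 (y : Int) : Prop :=
  ∃ n L p : Nat, 1 ≤ L ∧ L ≤ n/2 ∧ L ∣ n ∧ 10^(L-1) ≤ p ∧ p < 10^L ∧
    y = ((p * pvGeom (n/L) L : Nat) : Int)

lemma pvVal1_bounds {d x : Nat} (hd : 1 ≤ d) (hlo : 10^(d-1) ≤ x) (hhi : x < 10^d) :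
    10^(2*d-1) ≤ x * (10^d + 1) ∧ x * (10^d + 1) < 10^(2*d) := by
  have h1 : (10:Nat)^(2*d-1) = 10^(d-1) * 10^d := by rw [← pow_add]; congr 1; omega
  have h2 : (10:Nat)^(2*d) = 10^d * 10^d := by rw [← pow_add]; congr 1; omega
  constructor
  · calc (10:Nat)^(2*d-1) = 10^(d-1) * 10^d := h1
      _ ≤ x * 10^d := Nat.mul_le_mul_right _ hlo
      _ ≤ x * (10^d + 1) := Nat.mul_le_mul_left _ (by omega)
  · calc x * (10^d + 1) = x * 10^d + x := by ring
      _ < x * 10^d + 10^d := by omega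
      _ = (x+1) * 10^d := by ring
      _ ≤ 10^d * 10^d := Nat.mul_le_mul_right _ (by omega)
      _ = 10^(2*d) := h2.symm

lemma pvVal2_bounds {n L p : Nat} (hL1 : 1 ≤ L) (hL2 : L ≤ n/2) (hdvd : L ∣ n)
    (hplo : 10^(L-1) ≤ p) (hphi : p < 10^L) :
    10^(n-1) ≤ p * pvGeom (n/L) L ∧ p * pvGeom (n/L) L < 10^n := by
  have hkL : (n/L) * L = n := Nat.div_mul_cancel hdvd
  have hn2 : 2 ≤ n := by
    rcases hdvd with ⟨k, rfl⟩; omega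
  have hk1 : 1 ≤ n / L := by
    rw [Nat.le_div_iff_mul_le (by omega)]; omega
  constructor
  · have := pvGeom_mul_ge (p := p) (L := L) (k := n/L) hplo hk1 hL1
    rwa [hkL] at this
  · have := pvGeom_mul_lt (p := p) (L := L) (n/L) hphi
    rwa [hkL] at this

lemma P1_iff_math (y : Int) : pvP1 y = true ↔ pvMathP1 y := by
  constructor
  · intro h
    rcases lt_trichotomy y 0 with hy | hy | hy
    · rw [pvP1, p1_neg hy] at h; exact absurd h (by simp)
    · rw [pvP1, hy, p1_zero] at h; exact absurd h (by simp)
    · have hv1 : 1 ≤ y.toNat := by omega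
      obtain ⟨d, hd, hlo, hhi⟩ := exists_digits y.toNat hv1
      have hy' : ((y.toNat : Nat) : Int) = y := by omega
      rw [pvP1, ← hy', p1_char hd hlo hhi] at h
      obtain ⟨hpar, hhalf⟩ := h
      set v := y.toNat with hv
      set e := d/2 with he
      have he1 : 1 ≤ e := by omega
      have hdee : d = e + e := by omega
      have hdivlt : v / 10^e < 10^e := by
        rw [Nat.div_lt_iff_lt_mul (by positivity)]
        calc v < 10^d := hhi
          _ = 10^e * 10^e := by rw [← pow_add, ← hdee]
      have hdivge : 10^(e-1) ≤ v / 10^e := by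
        rw [Nat.le_div_iff_mul_le (by positivity), ← pow_add]
        calc (10:Nat)^(e-1+e) = 10^(d-1) := by congr 1; omega
          _ ≤ v := hlo
      refine ⟨e, v / 10^e, he1, hdivge, hdivlt, ?_⟩
      rw [← hy']
      congr 1
      have hsplit : v = v / 10^e * 10^e + v % 10^e := by
        have := Nat.div_add_mod v (10^e)
        rw [Nat.mul_comm] at this
        omega
      calc v = v / 10^e * 10^e + v % 10^e := hsplit
        _ = v / 10^e * 10^e + v / 10^e := by rw [← hhalf]
        _ = v / 10^e * (10^e + 1) := by ring
  · rintro ⟨d, x, hd, hlo, hhi, rfl⟩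
    set v := x * (10^d + 1) with hv
    obtain ⟨hvlo, hvhi⟩ := pvVal1_bounds hd hlo hhi
    have h2d : 1 ≤ 2*d := by omega
    have htn : ((v:Int)).toNat = v := by omega
    rw [pvP1, show ((v:Nat):Int) = ((v:Nat):Int) from rfl]
    rw [p1_char (v := v) h2d hvlo hvhi]
    refine ⟨by omega, ?_⟩
    have hx1 : v / 10^(2*d/2) = x := by
      rw [show 2*d/2 = d by omega, hv]
      rw [show x * (10^d+1) = 10^d * x + x by ring]
      rw [Nat.mul_add_div (by positivity), Nat.div_eq_of_lt hhi]
      omega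
    have hx2 : v % 10^(2*d/2) = x := by
      rw [show 2*d/2 = d by omega, hv]
      rw [show x * (10^d+1) = 10^d * x + x by ring]
      rw [Nat.mul_add_mod, Nat.mod_eq_of_lt hhi]
    rw [hx1, hx2]

lemma P2_iff_math (y : Int) : pvP2 y = true ↔ pvMathP2 y := by
  constructor
  · intro h
    rcases lt_trichotomy y 0 with hy | hy | hy
    · rw [pvP2, p2_neg hy] at h; exact absurd h (by simp)
    · rw [pvP2, hy, p2_zero] at h; exact absurd h (by simp)
    · have hv1 : 1 ≤ y.toNat := by omega
      obtain ⟨d, hd, hlo, hhi⟩ := exists_digits y.toNat hv1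
      have hy' : ((y.toNat : Nat) : Int) = y := by omega
      rw [pvP2, ← hy', p2_char hd hlo hhi] at h
      obtain ⟨L, hL1, hL2, hdvd, heq⟩ := h
      set v := y.toNat with hv
      refine ⟨d, L, v / 10^(d-L), hL1, hL2, hdvd, ?_, ?_, by rw [← hy']; exact_mod_cast congrArg (Nat.cast : Nat → Int) heq⟩
      · rw [Nat.le_div_iff_mul_le (by positivity), ← pow_add]
        calc (10:Nat)^(L-1+(d-L)) = 10^(d-1) := by congr 1; omega
          _ ≤ v := hlo
      · rw [Nat.div_lt_iff_lt_mul (by positivity)]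
        calc v < 10^d := hhi
          _ = 10^L * 10^(d-L) := by rw [← pow_add]; congr 1; omega
  · rintro ⟨n, L, p, hL1, hL2, hdvd, hplo, hphi, rfl⟩
    set v := p * pvGeom (n/L) L with hv
    obtain ⟨hvlo, hvhi⟩ := pvVal2_bounds hL1 hL2 hdvd hplo hphi
    have hn1 : 1 ≤ n := by
      rcases hdvd with ⟨k, rfl⟩; omega
    rw [pvP2, p2_char (v := v) hn1 hvlo hvhi]
    refine ⟨L, hL1, hL2, hdvd, ?_⟩
    have hkL : (n/L) * L = n := Nat.div_mul_cancel hdvd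
    have hk1 : 1 ≤ n / L := by rw [Nat.le_div_iff_mul_le (by omega)]; omega
    have hnL : n - L = (n/L - 1) * L := by
      have h := Nat.sub_mul (n/L) 1 L
      rw [one_mul] at h
      omega
    have htop : v / 10^(n-L) = p := by
      rw [hv, hnL]
      exact pvGeom_div_top hphi hk1
    rw [htop]

lemma foldl_set_mem {α : Type} (st : PySem.Set Int → α → PySem.Set Int) (Q : α → Int → Prop)
    (hst : ∀ bl x y, y ∈ st bl x ↔ y ∈ bl ∨ Q x y) (l : List α) :
    ∀ (bl : PySem.Set Int) (y : Int), y ∈ l.foldl st bl ↔ y ∈ bl ∨ ∃ x ∈ l, Q x y := by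
  induction l with
  | nil => simp
  | cons x t ih =>
    intro bl y
    simp only [List.foldl_cons, ih, hst, List.mem_cons]
    constructor
    · rintro ((h | h) | ⟨z, hz, h⟩)
      · exact Or.inl h
      · exact Or.inr ⟨x, Or.inl rfl, h⟩
      · exact Or.inr ⟨z, Or.inr hz, h⟩
    · rintro (h | ⟨z, (rfl | hz), h⟩)
      · exact Or.inl (Or.inl h)
      · exact Or.inl (Or.inr h)
      · exact Or.inr ⟨z, hz, h⟩

lemma foldl_set_nodup {α : Type} (st : PySem.Set Int → α → PySem.Set Int)
    (hst : ∀ bl x, bl.Nodup → (st bl x).Nodup) (l : List α) :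
    ∀ (bl : PySem.Set Int), bl.Nodup → (l.foldl st bl).Nodup := by
  induction l with
  | nil => intro bl h; exact h
  | cons x t ih => intro bl h; exact ih _ (hst bl x h)

lemma pvL1_eq (a b : Int) : pvL1 a b =
    (PySem.List.pyRange 1 (PySem.Int.floordiv (PySem.Str.len (PySem.Int.toStr b)) 2 + 1) 1).flatMap
      (fun d => ((PySem.List.pyRange ((10:Int) ^ (d-1).toNat) ((10:Int) ^ d.toNat) 1).map
          (fun x => x * ((10:Int) ^ d.toNat + 1))).filter
        (fun v => decide (a ≤ v ∧ v ≤ b))) := by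
  unfold pvL1
  have hinner : ∀ (d : Int) (acc : List Int),
      (PySem.List.pyRange ((10:Int) ^ (d-1).toNat) ((10:Int) ^ d.toNat) 1).foldl
        (fun acc x => if a ≤ x * ((10:Int) ^ d.toNat + 1) ∧ x * ((10:Int) ^ d.toNat + 1) ≤ b
          then acc ++ [x * ((10:Int) ^ d.toNat + 1)] else acc) acc
      = acc ++ ((PySem.List.pyRange ((10:Int) ^ (d-1).toNat) ((10:Int) ^ d.toNat) 1).map
          (fun x => x * ((10:Int) ^ d.toNat + 1))).filter (fun v => decide (a ≤ v ∧ v ≤ b)) := by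
    intro d acc
    have hbody : (fun (acc : List Int) (x : Int) =>
        if a ≤ x * ((10:Int) ^ d.toNat + 1) ∧ x * ((10:Int) ^ d.toNat + 1) ≤ b
          then acc ++ [x * ((10:Int) ^ d.toNat + 1)] else acc)
        = (fun acc x => if (fun x : Int => decide (a ≤ x * ((10:Int) ^ d.toNat + 1) ∧ x * ((10:Int) ^ d.toNat + 1) ≤ b)) x = true
            then acc ++ [(fun x : Int => x * ((10:Int) ^ d.toNat + 1)) x] else acc) := by
      funext acc x
      by_cases h : a ≤ x * ((10:Int) ^ d.toNat + 1) ∧ x * ((10:Int) ^ d.toNat + 1) ≤ b <;> simp [h]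
    rw [hbody, PySem.List.foldl_append_if, List.filter_map]
    simp [Function.comp_def]
  have houter : (fun (acc : List Int) (d : Int) =>
      (PySem.List.pyRange ((10:Int) ^ (d-1).toNat) ((10:Int) ^ d.toNat) 1).foldl
        (fun acc x => if a ≤ x * ((10:Int) ^ d.toNat + 1) ∧ x * ((10:Int) ^ d.toNat + 1) ≤ b
          then acc ++ [x * ((10:Int) ^ d.toNat + 1)] else acc) acc)
      = (fun (acc : List Int) (d : Int) => acc ++
        ((PySem.List.pyRange ((10:Int) ^ (d-1).toNat) ((10:Int) ^ d.toNat) 1).map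
          (fun x => x * ((10:Int) ^ d.toNat + 1))).filter (fun v => decide (a ≤ v ∧ v ≤ b))) := by
    funext acc d
    exact hinner d acc
  rw [houter, PySem.List.foldl_append_eq_flatMap, List.nil_append]

lemma nb_eq {b : Int} {D : Nat} (hD1 : 1 ≤ D) (hlo : 10^(D-1) ≤ b.toNat) (hhi : b.toNat < 10^D) :
    PySem.Str.len (PySem.Int.toStr b) = (D : Int) := by
  have hb : b = ((b.toNat : Nat) : Int) := by
    have := Nat.one_le_pow (D-1) 10 (by norm_num)
    omega
  rw [hb, PySem.Str.len_eq, toStr_toList_pos hD1 hlo hhi, pvPad_length]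

lemma cast_pow_sub_one (d : Nat) (hd : 1 ≤ d) :
    (10:Int) ^ (((d:Int) - 1).toNat) = ((10^(d-1) : Nat) : Int) := by
  have h : ((d:Int) - 1).toNat = d - 1 := by omega
  rw [h]; push_cast; ring

lemma cast_pow_toNat (d : Nat) : (10:Int) ^ (((d:Int)).toNat) = ((10^d : Nat) : Int) := by
  rw [Int.toNat_natCast]; push_cast; ring

lemma mem_pvL1 {a b : Int} {D : Nat} (hnb : PySem.Str.len (PySem.Int.toStr b) = (D:Int)) (y : Int) :
    y ∈ pvL1 a b ↔ a ≤ y ∧ y ≤ b ∧ ∃ d x : Nat, 1 ≤ d ∧ d ≤ D/2 ∧ 10^(d-1) ≤ x ∧ x < 10^d ∧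
      y = ((x * (10^d + 1) : Nat) : Int) := by
  rw [pvL1_eq, hnb]
  have hfd : PySem.Int.floordiv (D:Int) 2 = ((D/2:Nat):Int) := by
    exact_mod_cast PySem.Int.floordiv_natCast D 2
  rw [hfd]
  simp only [List.mem_flatMap, List.mem_filter, List.mem_map, PySem.List.mem_pyRange_one,
    decide_eq_true_eq]
  constructor
  · rintro ⟨d, ⟨hd1, hd2⟩, ⟨⟨x, ⟨hx1, hx2⟩, rfl⟩, ha, hb2⟩⟩
    obtain ⟨dn, rfl⟩ : ∃ dn : Nat, d = (dn:Int) := ⟨d.toNat, by omega⟩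
    have hdn1 : 1 ≤ dn := by exact_mod_cast hd1
    rw [cast_pow_sub_one dn hdn1] at hx1
    rw [cast_pow_toNat dn] at hx2
    obtain ⟨xn, rfl⟩ : ∃ xn : Nat, x = (xn:Int) := ⟨x.toNat, by
      have := Nat.one_le_pow (dn-1) 10 (by norm_num)
      omega⟩
    refine ⟨ha, hb2, dn, xn, hdn1, by omega, by exact_mod_cast hx1, by exact_mod_cast hx2, ?_⟩
    rw [cast_pow_toNat dn]
    push_cast
    ring
  · rintro ⟨ha, hb2, d, x, hd1, hd2, hx1, hx2, rfl⟩
    refine ⟨(d:Int), ⟨by exact_mod_cast hd1, by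
        have : (d:Int) ≤ ((D/2 : Nat):Int) := by exact_mod_cast hd2
        omega⟩,
      ⟨⟨(x:Int), ⟨?_, ?_⟩, ?_⟩, ha, hb2⟩⟩
    · rw [cast_pow_sub_one d hd1]; exact_mod_cast hx1
    · rw [cast_pow_toNat d]; exact_mod_cast hx2
    · rw [cast_pow_toNat d]; push_cast; ring

lemma mem_inner1_bounds {a b d y : Int} (hd : 1 ≤ d)
    (hy : y ∈ ((PySem.List.pyRange ((10:Int) ^ (d-1).toNat) ((10:Int) ^ d.toNat) 1).map
          (fun x => x * ((10:Int) ^ d.toNat + 1))).filter (fun v => decide (a ≤ v ∧ v ≤ b))) :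
    ((10^(2*d.toNat-1) : Nat) : Int) ≤ y ∧ y < ((10^(2*d.toNat) : Nat) : Int) := by
  rw [List.mem_filter] at hy
  obtain ⟨x, hx, rfl⟩ := List.mem_map.mp hy.1
  rw [PySem.List.mem_pyRange_one] at hx
  obtain ⟨dn, rfl⟩ : ∃ dn : Nat, d = (dn:Int) := ⟨d.toNat, by omega⟩
  have hdn1 : 1 ≤ dn := by exact_mod_cast hd
  rw [cast_pow_sub_one dn hdn1] at hx
  rw [cast_pow_toNat dn] at hx
  obtain ⟨xn, rfl⟩ : ∃ xn : Nat, x = (xn:Int) := ⟨x.toNat, by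
    have := Nat.one_le_pow (dn-1) 10 (by norm_num); omega⟩
  have hb1 : 10^(dn-1) ≤ xn := by exact_mod_cast hx.1
  have hb2 : xn < 10^dn := by exact_mod_cast hx.2
  obtain ⟨hlo, hhi⟩ := pvVal1_bounds hdn1 hb1 hb2
  rw [Int.toNat_natCast]
  constructor
  · calc ((10^(2*dn-1) : Nat) : Int) ≤ ((xn * (10^dn + 1) : Nat) : Int) := by exact_mod_cast hlo
      _ = (xn:Int) * ((10:Int)^(dn:Nat) + 1) := by push_cast; ring
      _ = (xn:Int) * ((10:Int)^(((dn:Int)).toNat) + 1) := by rw [Int.toNat_natCast]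
  · calc (xn:Int) * ((10:Int)^(((dn:Int)).toNat) + 1)
        = ((xn * (10^dn + 1) : Nat) : Int) := by rw [Int.toNat_natCast]; push_cast; ring
      _ < ((10^(2*dn) : Nat) : Int) := by exact_mod_cast hhi

lemma pairwise_pvL1 (a b : Int) : (pvL1 a b).Pairwise (·<·) := by
  rw [pvL1_eq, List.flatMap_def, List.pairwise_flatten]
  constructor
  · intro l hl
    obtain ⟨d, hd, rfl⟩ := List.mem_map.mp hl
    rw [PySem.List.mem_pyRange_one] at hd
    apply List.Pairwise.sublist (List.filter_sublist)
    apply List.Pairwise.map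
    · intro x y hxy
      have hm : (0:Int) < (10:Int) ^ d.toNat + 1 := by positivity
      exact mul_lt_mul_of_pos_right hxy hm
    · exact PySem.List.pairwise_lt_pyRange_one _ _
  · rw [List.pairwise_map]
    apply List.Pairwise.imp_of_mem (R := (· < ·)) ?_ (PySem.List.pairwise_lt_pyRange_one _ _)
    intro d d' hd hd' hlt x hx y hy
    rw [PySem.List.mem_pyRange_one] at hd hd'
    have h1 := (mem_inner1_bounds (show (1:Int) ≤ d by omega) hx).2
    have h2 := (mem_inner1_bounds (show (1:Int) ≤ d' by omega) hy).1
    have hmono : (10:Nat)^(2*d.toNat) ≤ 10^(2*d'.toNat - 1) := by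
      apply Nat.pow_le_pow_right (by norm_num)
      omega
    calc x < ((10^(2*d.toNat) : Nat) : Int) := h1
      _ ≤ ((10^(2*d'.toNat - 1) : Nat) : Int) := by exact_mod_cast hmono
      _ ≤ y := h2

lemma rep_cast {nn Ln : Nat} (hdvd : Ln ∣ nn) (hL1 : 1 ≤ Ln) :
    PySem.Int.floordiv ((10:Int)^nn - 1) ((10:Int)^Ln - 1)
      = ((pvGeom (nn/Ln) Ln : Nat) : Int) := by
  have h1 : (10:Int)^nn - 1 = ((10^nn - 1 : Nat) : Int) := by
    have := Nat.one_le_pow nn 10 (by norm_num)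
    push_cast [Nat.cast_sub this]
    ring
  have h2 : (10:Int)^Ln - 1 = ((10^Ln - 1 : Nat) : Int) := by
    have := Nat.one_le_pow Ln 10 (by norm_num)
    push_cast [Nat.cast_sub this]
    ring
  rw [h1, h2]
  rw [show PySem.Int.floordiv ((10^nn - 1 : Nat) : Int) ((10^Ln - 1 : Nat) : Int)
      = (((10^nn - 1) / (10^Ln - 1) : Nat) : Int) by exact_mod_cast PySem.Int.floordiv_natCast _ _]
  congr 1
  have hkL : (nn/Ln) * Ln = nn := Nat.div_mul_cancel hdvd
  have hgeom := pvGeom_mul_eq (nn/Ln) Ln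
  rw [hkL] at hgeom
  rw [hgeom]
  have hpos : 0 < 10^Ln - 1 := by
    have : (10:Nat)^1 ≤ 10^Ln := Nat.pow_le_pow_right (by norm_num) hL1
    simp at this; omega
  exact Nat.mul_div_cancel _ hpos

lemma mem_pvBlock {a b : Int} (nn : Nat) (y : Int) :
    y ∈ pvBlock a b (nn : Int) ↔ a ≤ y ∧ y ≤ b ∧ ∃ L p : Nat, 1 ≤ L ∧ L ≤ nn/2 ∧ L ∣ nn ∧
      10^(L-1) ≤ p ∧ p < 10^L ∧ y = ((p * pvGeom (nn/L) L : Nat) : Int) := by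
  unfold pvBlock
  set R : Int → Int := fun L =>
    PySem.Int.floordiv ((10:Int) ^ ((nn:Int)).toNat - 1) ((10:Int) ^ L.toNat - 1) with hR
  have hstep := foldl_set_mem
    (fun (bl : PySem.Set Int) (L : Int) =>
      if PySem.Int.mod (nn:Int) L = 0 then
        (PySem.List.pyRange ((10:Int) ^ (L-1).toNat) ((10:Int) ^ L.toNat) 1).foldl
          (fun bl p => if a ≤ p * R L ∧ p * R L ≤ b
            then PySem.Set.add bl (p * R L) else bl) bl
      else bl)
    (fun (L : Int) (y : Int) => PySem.Int.mod (nn:Int) L = 0 ∧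
      ∃ p ∈ PySem.List.pyRange ((10:Int) ^ (L-1).toNat) ((10:Int) ^ L.toNat) 1,
        (a ≤ p * R L ∧ p * R L ≤ b) ∧ y = p * R L)
    (by
      intro bl L z
      dsimp only
      by_cases hm : PySem.Int.mod (nn:Int) L = 0
      · rw [if_pos hm]
        rw [foldl_set_mem _ (fun (p : Int) (z : Int) => (a ≤ p * R L ∧ p * R L ≤ b) ∧ z = p * R L)
          (by
            intro bl' p z'
            dsimp only
            by_cases hc : a ≤ p * R L ∧ p * R L ≤ b
            · rw [if_pos hc]
              rw [PySem.Set.mem_add]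
              tauto
            · rw [if_neg hc]; tauto)]
        simp [hm]
      · rw [if_neg hm]
        simp [hm])
    (PySem.List.pyRange 1 (PySem.Int.floordiv (nn:Int) 2 + 1) 1)
    PySem.Set.empty y
  rw [hstep]
  have hfd : PySem.Int.floordiv (nn:Int) 2 = ((nn/2:Nat):Int) := by
    exact_mod_cast PySem.Int.floordiv_natCast nn 2
  rw [hfd]
  simp only [PySem.Set.empty, List.not_mem_nil, false_or, PySem.List.mem_pyRange_one]
  constructor
  · rintro ⟨L, ⟨hL1, hL2⟩, hm, p, hp, ⟨ha, hb2⟩, rfl⟩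
    obtain ⟨Ln, rfl⟩ : ∃ Ln : Nat, L = (Ln:Int) := ⟨L.toNat, by omega⟩
    have hLn1 : 1 ≤ Ln := by exact_mod_cast hL1
    have hdvd : Ln ∣ nn := by
      rw [PySem.Int.mod_eq_zero_iff_dvd] at hm
      exact_mod_cast hm
    have hRL : R (Ln:Int) = ((pvGeom (nn/Ln) Ln : Nat) : Int) := by
      rw [hR]
      simp only [Int.toNat_natCast]
      exact rep_cast hdvd hLn1
    rw [cast_pow_sub_one Ln hLn1] at hp
    rw [cast_pow_toNat Ln] at hp
    obtain ⟨pn, rfl⟩ : ∃ pn : Nat, p = (pn:Int) := ⟨p.toNat, by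
      have := Nat.one_le_pow (Ln-1) 10 (by norm_num); omega⟩
    rw [hRL] at ha hb2 ⊢
    have hLn2 : Ln ≤ nn/2 := by
      have : ((Ln:Nat):Int) < ((nn/2 : Nat):Int) + 1 := hL2
      omega
    refine ⟨ha, hb2, Ln, pn, hLn1, hLn2, hdvd,
      by exact_mod_cast hp.1, by exact_mod_cast hp.2, by push_cast; ring⟩
  · rintro ⟨ha, hb2, Ln, pn, hLn1, hLn2, hdvd, hp1, hp2, rfl⟩
    have hRL : R (Ln:Int) = ((pvGeom (nn/Ln) Ln : Nat) : Int) := by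
      rw [hR]
      simp only [Int.toNat_natCast]
      exact rep_cast hdvd hLn1
    refine ⟨(Ln:Int), ⟨by exact_mod_cast hLn1, by
        have : ((Ln:Nat):Int) ≤ ((nn/2 : Nat):Int) := by exact_mod_cast hLn2
        omega⟩,
      by rw [PySem.Int.mod_eq_zero_iff_dvd]; exact_mod_cast hdvd,
      (pn:Int), ?_, ⟨?_, ?_⟩, ?_⟩
    · rw [cast_pow_sub_one Ln hLn1, cast_pow_toNat Ln]
      constructor
      · exact_mod_cast hp1
      · exact_mod_cast hp2
    · rw [hRL]; exact ha
    · rw [hRL]; exact hb2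
    · rw [hRL]; push_cast; ring

lemma nodup_pvBlock (a b n : Int) : (pvBlock a b n).Nodup := by
  unfold pvBlock
  apply foldl_set_nodup
  · intro bl L hbl
    dsimp only
    by_cases hm : PySem.Int.mod n L = 0
    · rw [if_pos hm]
      apply foldl_set_nodup
      · intro bl' p hbl'
        dsimp only
        by_cases hc : a ≤ p * PySem.Int.floordiv ((10:Int) ^ n.toNat - 1) ((10:Int) ^ L.toNat - 1)
            ∧ p * PySem.Int.floordiv ((10:Int) ^ n.toNat - 1) ((10:Int) ^ L.toNat - 1) ≤ b
        · rw [if_pos hc]; exact PySem.Set.nodup_add _ _ hbl'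
        · rw [if_neg hc]; exact hbl'
      · exact hbl
    · rw [if_neg hm]; exact hbl
  · exact List.nodup_nil

lemma pvL2_eq (a b : Int) : pvL2 a b =
    (PySem.List.pyRange 2 (PySem.Str.len (PySem.Int.toStr b) + 1) 1).flatMap
      (fun n => PySem.List.sorted (pvBlock a b n) (fun x => x) false) := by
  unfold pvL2
  rw [PySem.List.foldl_append_eq_flatMap, List.nil_append]

lemma mem_pvL2 {a b : Int} {D : Nat} (hnb : PySem.Str.len (PySem.Int.toStr b) = (D:Int)) (y : Int) :
    y ∈ pvL2 a b ↔ a ≤ y ∧ y ≤ b ∧ ∃ n L p : Nat, 2 ≤ n ∧ n ≤ D ∧ 1 ≤ L ∧ L ≤ n/2 ∧ L ∣ n ∧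
      10^(L-1) ≤ p ∧ p < 10^L ∧ y = ((p * pvGeom (n/L) L : Nat) : Int) := by
  rw [pvL2_eq, hnb]
  simp only [List.mem_flatMap, PySem.List.mem_pyRange_one, PySem.List.mem_sorted]
  constructor
  · rintro ⟨n, ⟨hn1, hn2⟩, hy⟩
    obtain ⟨nn, rfl⟩ : ∃ nn : Nat, n = (nn:Int) := ⟨n.toNat, by omega⟩
    rw [mem_pvBlock] at hy
    obtain ⟨ha, hb2, L, p, h1, h2, h3, h4, h5, rfl⟩ := hy
    exact ⟨ha, hb2, nn, L, p, by exact_mod_cast hn1, by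
      have : ((nn:Nat):Int) < (D:Int) + 1 := hn2
      omega, h1, h2, h3, h4, h5, rfl⟩
  · rintro ⟨ha, hb2, nn, L, p, hn1, hn2, h1, h2, h3, h4, h5, rfl⟩
    refine ⟨(nn:Int), ⟨by exact_mod_cast hn1, by
        have : ((nn:Nat):Int) ≤ (D:Int) := by exact_mod_cast hn2
        omega⟩, ?_⟩
    rw [mem_pvBlock]
    exact ⟨ha, hb2, L, p, h1, h2, h3, h4, h5, rfl⟩

lemma mem_pvBlock_bounds {a b : Int} {nn : Nat} {y : Int} (hy : y ∈ pvBlock a b (nn:Int)) :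
    ((10^(nn-1) : Nat) : Int) ≤ y ∧ y < ((10^nn : Nat) : Int) := by
  rw [mem_pvBlock] at hy
  obtain ⟨-, -, L, p, h1, h2, h3, h4, h5, rfl⟩ := hy
  obtain ⟨hlo, hhi⟩ := pvVal2_bounds h1 h2 h3 h4 h5
  exact ⟨by exact_mod_cast hlo, by exact_mod_cast hhi⟩

lemma pairwise_pvL2 (a b : Int) : (pvL2 a b).Pairwise (·<·) := by
  rw [pvL2_eq, List.flatMap_def, List.pairwise_flatten]
  constructor
  · intro l hl
    obtain ⟨n, hn, rfl⟩ := List.mem_map.mp hl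
    have hle := PySem.List.sorted_pairwise (pvBlock a b n) (fun x => x) -- pairwise ≤ on keys
    have hnd : (PySem.List.sorted (pvBlock a b n) (fun x => x) false).Nodup :=
      (PySem.List.sorted_perm (pvBlock a b n) (fun x => x) false).nodup_iff.mpr (nodup_pvBlock a b n)
    have := List.Pairwise.and hle hnd
    exact this.imp (fun {x y} h => lt_of_le_of_ne h.1 h.2)
  · rw [List.pairwise_map]
    apply List.Pairwise.imp_of_mem (R := (· < ·)) ?_ (PySem.List.pairwise_lt_pyRange_one _ _)
    intro n n' hn hn' hlt x hx y hy
    rw [PySem.List.mem_pyRange_one] at hn hn'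
    rw [PySem.List.mem_sorted] at hx hy
    obtain ⟨nn, rfl⟩ : ∃ nn : Nat, n = (nn:Int) := ⟨n.toNat, by omega⟩
    obtain ⟨nn', rfl⟩ : ∃ nn' : Nat, n' = (nn':Int) := ⟨n'.toNat, by omega⟩
    have h1 := (mem_pvBlock_bounds hx).2
    have h2 := (mem_pvBlock_bounds hy).1
    have hmono : (10:Nat)^nn ≤ 10^(nn'-1) := by
      apply Nat.pow_le_pow_right (by norm_num)
      have : nn < nn' := by exact_mod_cast hlt
      omega
    calc x < ((10^nn : Nat) : Int) := h1
      _ ≤ ((10^(nn'-1) : Nat) : Int) := by exact_mod_cast hmono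
      _ ≤ y := h2

lemma pvExt (l1 l2 : List Int) (h1 : l1.Pairwise (·<·)) (h2 : l2.Pairwise (·<·))
    (h : ∀ x, x ∈ l1 ↔ x ∈ l2) : l1 = l2 :=
  List.Perm.eq_of_pairwise
    (by intro x y _ _ hxy hyx; omega)
    h1 h2
    (List.perm_of_nodup_nodup_toFinset_eq h1.nodup h2.nodup (by ext x; simp [h x]))

lemma pvP1_nonpos {y : Int} (hy : y ≤ 0) : pvP1 y = false := by
  rcases lt_or_eq_of_le hy with h | h
  · exact p1_neg h
  · rw [h]; exact p1_zero

lemma pvP2_nonpos {y : Int} (hy : y ≤ 0) : pvP2 y = false := by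
  rcases lt_or_eq_of_le hy with h | h
  · exact p2_neg h
  · rw [h]; exact p2_zero

lemma digit_le_of_le {y : Int} {e D : Nat} (hb1 : 1 ≤ (10:Int))
    {b : Int} (hyb : y ≤ b) (hD : b.toNat < 10^D)
    (hylo : ((10^(e-1) : Nat) : Int) ≤ y) : e ≤ D := by
  have h0 : (0:Int) ≤ y := le_trans (by positivity) hylo
  have h1 : (10:Nat)^(e-1) ≤ y.toNat := by omega
  have h2 : y.toNat ≤ b.toNat := by omega
  have h3 : (10:Nat)^(e-1) < 10^D := by omega
  have := (Nat.pow_lt_pow_iff_right (a := 10) (by norm_num)).mp h3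
  omega

theorem main_eq (a b : Int) : get_invalid_in_range a b = get_invalid_in_range_alt a b := by
  rw [A_eq]
  by_cases hb : 1 ≤ b
  · have hb1 : 1 ≤ b.toNat := by omega
    obtain ⟨D, hD1, hDlo, hDhi⟩ := exists_digits b.toNat hb1
    have hnb := nb_eq hD1 hDlo hDhi
    rw [B_eval a b hb]
    have pwA1 : ((PySem.List.pyRange a (b+1) 1).filter pvP1).Pairwise (·<·) :=
      List.Pairwise.sublist (List.filter_sublist) (PySem.List.pairwise_lt_pyRange_one _ _)
    have pwA2 : ((PySem.List.pyRange a (b+1) 1).filter pvP2).Pairwise (·<·) :=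
      List.Pairwise.sublist (List.filter_sublist) (PySem.List.pairwise_lt_pyRange_one _ _)
    have e1 : (PySem.List.pyRange a (b+1) 1).filter pvP1 = pvL1 a b := by
      apply pvExt _ _ pwA1 (pairwise_pvL1 a b)
      intro y
      rw [List.mem_filter, PySem.List.mem_pyRange_one, mem_pvL1 hnb, P1_iff_math]
      constructor
      · rintro ⟨⟨hy1, hy2⟩, d, x, hd1, hxlo, hxhi, rfl⟩
        obtain ⟨hvlo, hvhi⟩ := pvVal1_bounds hd1 hxlo hxhi
        have hdD : 2*d ≤ D := by
          have := digit_le_of_le (e := 2*d) (by norm_num) (by omega : ((x * (10^d+1) : Nat):Int) ≤ b) hDhi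
            (by exact_mod_cast hvlo)
          -- `this : 2*d ≤ D` but careful: digit_le_of_le gives e ≤ D with e=2*d; need 2*d-1 vs... recheck below
          omega
        exact ⟨hy1, by omega, d, x, hd1, by omega, hxlo, hxhi, rfl⟩
      · rintro ⟨hy1, hy2, d, x, hd1, hdD, hxlo, hxhi, rfl⟩
        exact ⟨⟨hy1, by omega⟩, d, x, hd1, hxlo, hxhi, rfl⟩
    have e2 : (PySem.List.pyRange a (b+1) 1).filter pvP2 = pvL2 a b := by
      apply pvExt _ _ pwA2 (pairwise_pvL2 a b)
      intro y
      rw [List.mem_filter, PySem.List.mem_pyRange_one, mem_pvL2 hnb, P2_iff_math]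
      constructor
      · rintro ⟨⟨hy1, hy2⟩, n, L, p, hL1, hL2, hdvd, hplo, hphi, rfl⟩
        obtain ⟨hvlo, hvhi⟩ := pvVal2_bounds hL1 hL2 hdvd hplo hphi
        have hn2 : 2 ≤ n := by rcases hdvd with ⟨k, rfl⟩; omega
        have hnD : n ≤ D := by
          have := digit_le_of_le (e := n) (by norm_num) (by omega : ((p * pvGeom (n/L) L : Nat):Int) ≤ b) hDhi
            (by exact_mod_cast hvlo)
          omega
        exact ⟨hy1, by omega, n, L, p, hn2, hnD, hL1, hL2, hdvd, hplo, hphi, rfl⟩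
      · rintro ⟨hy1, hy2, n, L, p, hn2, hnD, hL1, hL2, hdvd, hplo, hphi, rfl⟩
        exact ⟨⟨hy1, by omega⟩, n, L, p, hL1, hL2, hdvd, hplo, hphi, rfl⟩
    rw [e1, e2,
      PySem.Set.ofList_eq_self_of_nodup _ ((pairwise_pvL1 a b).nodup),
      PySem.Set.ofList_eq_self_of_nodup _ ((pairwise_pvL2 a b).nodup)]
  · rw [show get_invalid_in_range_alt a b = ([], []) by
      unfold get_invalid_in_range_alt; rw [if_neg hb]]
    refine Prod.ext ?_ ?_ <;> simp only <;>
      rw [List.filter_eq_nil_iff] <;>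
      intro y hy <;>
      rw [PySem.List.mem_pyRange_one] at hy
    · rw [pvP1_nonpos (by omega)]; simp
    · rw [pvP2_nonpos (by omega)]; simp

-- ===== VERDICT (by name: the statement is the Claim_ definition above) =====
theorem get_invalid_in_range_spec : Claim_equal_get_invalid_in_range := by
  intro a b _
  unfold Spec_get_invalid_in_range
  exact main_eq a b
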